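-- pv_equiv track=rewrite | github.com/Sum-Outman/Self-Soul | core/architecture/representations.py | _semantic_chunking
-- ===== SOURCE A (Python) =====
-- def _semantic_chunking(tokens):
--     """Semantic chunking based on linguistic patterns"""
--     chunks = []
--     current_chunk = []
--
--     for token in tokens:
--         # Check for sentence boundaries
--         if token in ['.', '!', '?']:
--             if current_chunk:
--                 chunks.extend(current_chunk)
--                 chunks.append(token)
--                 current_chunk = []
--         else:
--             current_chunk.append(token)
--
--     # Add remaining tokens
--     if current_chunk:
--         chunks.extend(current_chunk)
--
--     return chunks
-- ===== SOURCE B (Python) =====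
-- def _semantic_chunking(tokens):
--     """Semantic chunking based on linguistic patterns.
--
--     A boundary token survives exactly when its immediate predecessor exists
--     and is not itself a boundary, so the whole pass is a stateless filter of
--     each token paired with the one before it (a virtual leading boundary
--     drops boundary tokens at the start)."""
--     boundary = {'.', '!', '?'}
--     prevs = ['.'] + tokens[:-1]
--     return [t for p, t in zip(prevs, tokens) if t not in boundary or p not in boundary]
-- ===== Notes on version B (the rewrite author's own statement) =====
-- stated objective: simpler
-- what changed: Replaces A's flush-accumulator loop (chunks + current_chunk state) with a stateless one-line filter that keeps each token unless both it and its immediate predecessor are sentence-boundary tokens (a virtual leading boundary drops boundary tokens at the start).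
import Mathlib
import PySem

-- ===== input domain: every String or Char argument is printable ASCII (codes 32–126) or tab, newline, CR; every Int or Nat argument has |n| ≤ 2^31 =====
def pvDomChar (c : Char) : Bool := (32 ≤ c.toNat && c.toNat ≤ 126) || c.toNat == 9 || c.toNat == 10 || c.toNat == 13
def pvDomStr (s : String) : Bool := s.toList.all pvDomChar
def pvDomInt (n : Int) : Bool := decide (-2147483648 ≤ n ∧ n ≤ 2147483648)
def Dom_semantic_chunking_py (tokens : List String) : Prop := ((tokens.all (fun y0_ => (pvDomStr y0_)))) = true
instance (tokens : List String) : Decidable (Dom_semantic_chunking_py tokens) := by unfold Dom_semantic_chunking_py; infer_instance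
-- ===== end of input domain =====

-- B replaces A's flush-accumulator loop by a stateless filter of each token
-- paired with its predecessor (objective: simpler; same O(n) cost).

-- ===== PORT A =====
-- A's loop state: (chunks, current_chunk); branches in A's order.
def pvAStep (st : List String × List String) (token : String) : List String × List String :=
  if token = "." ∨ token = "!" ∨ token = "?" then
    if st.2 ≠ [] then (st.1 ++ st.2 ++ [token], []) else st
  else (st.1, st.2 ++ [token])

def semantic_chunking_py (tokens : List String) : List String :=
  let st := tokens.foldl pvAStep ([], [])
  if st.2 ≠ [] then st.1 ++ st.2 else st.1

-- ===== PORT B =====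
def pvIsBoundary (t : String) : Bool := t == "." || t == "!" || t == "?"

-- Source B: prevs = ['.'] + tokens[:-1]; keep t when t or its predecessor is non-boundary.
def semantic_chunking_py_alt (tokens : List String) : List String :=
  let prevs := "." :: tokens.dropLast
  ((prevs.zip tokens).filter (fun pt => !pvIsBoundary pt.2 || !pvIsBoundary pt.1)).map (·.2)

-- ===== PRECONDITION & SPEC =====
def Spec_semantic_chunking_py (tokens : List String) (out : List String) : Prop := out = semantic_chunking_py_alt tokens
instance (tokens : List String) (out : List String) : Decidable (Spec_semantic_chunking_py tokens out) := by unfold Spec_semantic_chunking_py; infer_instance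

-- ===== CLAIM (what is proved, stated in full; the proofs are below) =====
def Claim_equal_semantic_chunking_py : Prop := ∀ (tokens : List String), Dom_semantic_chunking_py tokens → Spec_semantic_chunking_py tokens (semantic_chunking_py tokens)

-- ===== LEMMAS AND PROOFS =====

-- Reference function: keep t unless both t and the previous token are boundaries.
def pvG (prevB : Bool) : List String → List String
  | [] => []
  | t :: rest =>
      let b := pvIsBoundary t
      if b && prevB then pvG b rest else t :: pvG b rest

def pvAFinish (st : List String × List String) : List String :=
  if st.2 ≠ [] then st.1 ++ st.2 else st.1

theorem pvProp_iff_bool (t : String) :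
    (t = "." ∨ t = "!" ∨ t = "?") ↔ pvIsBoundary t = true := by
  simp [pvIsBoundary, or_assoc]

-- A's run from state (acc, cur) equals acc ++ cur ++ pvG cur.isEmpty ts.
theorem pvA_run (ts : List String) : ∀ (acc cur : List String),
    pvAFinish (ts.foldl pvAStep (acc, cur)) = acc ++ cur ++ pvG cur.isEmpty ts := by
  induction ts with
  | nil =>
      intro acc cur
      cases cur <;> simp [pvG, pvAFinish]
  | cons t rest ih =>
      intro acc cur
      rw [List.foldl_cons]
      by_cases hb : pvIsBoundary t = true
      · have hp : (t = "." ∨ t = "!" ∨ t = "?") := (pvProp_iff_bool t).2 hb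
        cases cur with
        | nil =>
            rw [show pvAStep (acc, []) t = (acc, []) by simp [pvAStep, if_pos hp]]
            rw [ih acc []]
            simp [pvG, hb]
        | cons c cs =>
            rw [show pvAStep (acc, c :: cs) t = (acc ++ (c :: cs) ++ [t], []) by
              simp [pvAStep, if_pos hp]]
            rw [ih (acc ++ (c :: cs) ++ [t]) []]
            simp [pvG, hb]
      · have hp : ¬(t = "." ∨ t = "!" ∨ t = "?") := fun h => hb ((pvProp_iff_bool t).1 h)
        rw [show pvAStep (acc, cur) t = (acc, cur ++ [t]) by simp [pvAStep, if_neg hp]]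
        rw [ih acc (cur ++ [t])]
        cases cur <;> simp [pvG, hb]

-- B's computation with an explicit sentinel p equals pvG (pvIsBoundary p).
theorem pvB_run (ts : List String) : ∀ (p : String),
    (((p :: ts.dropLast).zip ts).filter
        (fun pt => !pvIsBoundary pt.2 || !pvIsBoundary pt.1)).map (·.2)
    = pvG (pvIsBoundary p) ts := by
  induction ts with
  | nil => intro p; simp [pvG]
  | cons t rest ih =>
      intro p
      cases rest with
      | nil =>
          cases hb : pvIsBoundary t <;> cases hpb : pvIsBoundary p <;>
            simp [pvG, List.filter, hb, hpb]
      | cons r rs =>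
          have hz : (p :: (t :: r :: rs).dropLast).zip (t :: r :: rs)
              = (p, t) :: ((t :: (r :: rs).dropLast).zip (r :: rs)) := rfl
          rw [hz]
          have htail := ih t
          rw [List.filter_cons]
          cases hb : pvIsBoundary t <;> cases hpb : pvIsBoundary p
          · rw [if_pos (by simp), List.map_cons, htail]; simp [pvG, hb]
          · rw [if_pos (by simp), List.map_cons, htail]; simp [pvG, hb]
          · rw [if_pos (by simp), List.map_cons, htail]; simp [pvG, hb]
          · rw [if_neg (by simp), htail]; simp [pvG, hb]

-- ===== VERDICT (by name: the statement is the Claim_ definition above) =====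
theorem semantic_chunking_py_spec : Claim_equal_semantic_chunking_py := by
  intro tokens _
  show semantic_chunking_py tokens = semantic_chunking_py_alt tokens
  have hA := pvA_run tokens [] []
  have hB := pvB_run tokens "."
  simp only [pvAFinish] at hA
  simp only [semantic_chunking_py, semantic_chunking_py_alt]
  rw [hA, hB]
  rfl
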